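-- pv_equiv track=rewrite | github.com/MateKobiashvili/SDHCE-and-analyses | sdhce23.py | auto_interval_labels
-- ===== SOURCE A (Python) =====
-- def auto_interval_labels(n):
--     if n == 1:
--         return ["mid"]
--     if n == 2:
--         return ["low", "high"]
--     if n == 3:
--         return ["low", "mid", "high"]
--     labels    = [""] * n
--     labels[0] = "low"
--     labels[-1] = "high"
--     mid_count  = n - 2
--     if mid_count % 2 == 1:
--         centre             = mid_count // 2
--         labels[1 + centre] = "mid"
--         low_slots          = list(range(1, 1 + centre))
--         high_slots         = list(range(2 + centre, n - 1))
--     else: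
--         low_slots  = list(range(1, 1 + mid_count // 2))
--         high_slots = list(range(1 + mid_count // 2, n - 1))
--     for rank, idx in enumerate(reversed(low_slots), 1):
--         labels[idx] = f"mid_low{rank}"
--     for rank, idx in enumerate(high_slots, 1):
--         labels[idx] = f"mid_high{rank}"
--     return labels
-- ===== SOURCE B (Python) =====
-- def _label(n, m, c, i):
--     if m % 2 == 1 and i == 1 + c:
--         return "mid"
--     if i == 0:
--         return "low"
--     if i == n - 1:
--         return "high"
--     if i <= c:
--         return f"mid_low{c + 1 - i}"
--     if m % 2 == 1:
--         return f"mid_high{i - c - 1}"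
--     return f"mid_high{i - c}"
--
--
-- def auto_interval_labels(n):
--     m = n - 2
--     c = m // 2
--     return [_label(n, m, c, i) for i in range(n)]
-- ===== Notes on version B (the rewrite author's own statement) =====
-- stated objective: simpler
-- what changed: B computes each label directly from its index in a single comprehension (closed-form rank/parity arithmetic), instead of A's preallocated list, slot-index lists and two enumerate fill loops; the n=1/2/3 special cases disappear.
import Mathlib
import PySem

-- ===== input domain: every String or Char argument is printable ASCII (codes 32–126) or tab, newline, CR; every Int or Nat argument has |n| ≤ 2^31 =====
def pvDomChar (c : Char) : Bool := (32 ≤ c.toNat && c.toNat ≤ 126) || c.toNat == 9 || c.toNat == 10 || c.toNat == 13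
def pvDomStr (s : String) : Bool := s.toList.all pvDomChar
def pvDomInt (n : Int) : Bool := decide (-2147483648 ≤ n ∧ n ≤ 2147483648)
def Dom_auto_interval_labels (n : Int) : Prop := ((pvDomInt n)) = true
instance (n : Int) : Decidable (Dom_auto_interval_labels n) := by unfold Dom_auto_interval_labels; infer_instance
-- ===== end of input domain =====

-- B replaces A's slot-index lists and two fill loops by one pass computing each label
-- directly from the index (objective: simpler decomposition; same O(n) cost).

-- ===== PORT A =====
-- for rank, idx in enumerate(reversed(low_slots), 1): labels[idx] = f"mid_low{rank}"
def pvFillLow : List String → List Int → Int → List String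
  | labels, [], _ => labels
  | labels, idx :: rest, rank =>
      pvFillLow (PySem.List.pySetD labels idx ("mid_low" ++ PySem.Int.toStr rank)) rest (rank + 1)

-- for rank, idx in enumerate(high_slots, 1): labels[idx] = f"mid_high{rank}"
def pvFillHigh : List String → List Int → Int → List String
  | labels, [], _ => labels
  | labels, idx :: rest, rank =>
      pvFillHigh (PySem.List.pySetD labels idx ("mid_high" ++ PySem.Int.toStr rank)) rest (rank + 1)

def auto_interval_labels (n : Int) : List String :=
  if n = 1 then ["mid"]
  else if n = 2 then ["low", "high"]
  else if n = 3 then ["low", "mid", "high"]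
  else
    let labels := List.replicate n.toNat ""
    let labels := PySem.List.pySetD labels 0 "low"
    let labels := PySem.List.pySetD labels (-1) "high"
    let mid_count := n - 2
    if PySem.Int.mod mid_count 2 = 1 then
      let centre := PySem.Int.floordiv mid_count 2
      let labels := PySem.List.pySetD labels (1 + centre) "mid"
      let low_slots := PySem.List.pyRange 1 (1 + centre)
      let high_slots := PySem.List.pyRange (2 + centre) (n - 1)
      pvFillHigh (pvFillLow labels low_slots.reverse 1) high_slots 1
    else
      let low_slots := PySem.List.pyRange 1 (1 + PySem.Int.floordiv mid_count 2)
      let high_slots := PySem.List.pyRange (1 + PySem.Int.floordiv mid_count 2) (n - 1)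
      pvFillHigh (pvFillLow labels low_slots.reverse 1) high_slots 1

-- ===== PORT B =====
def pvLabel (n m c i : Int) : String :=
  if PySem.Int.mod m 2 = 1 ∧ i = 1 + c then "mid"
  else if i = 0 then "low"
  else if i = n - 1 then "high"
  else if i ≤ c then "mid_low" ++ PySem.Int.toStr (c + 1 - i)
  else if PySem.Int.mod m 2 = 1 then "mid_high" ++ PySem.Int.toStr (i - c - 1)
  else "mid_high" ++ PySem.Int.toStr (i - c)

def auto_interval_labels_alt (n : Int) : List String :=
  let m := n - 2
  let c := PySem.Int.floordiv m 2
  (PySem.List.pyRange 0 n).map (pvLabel n m c)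

-- ===== PRECONDITION & SPEC =====
-- Pre_ excludes n ≤ 0, on which A raises IndexError (labels[0] on the empty list).
def Pre_auto_interval_labels (n : Int) : Prop := 1 ≤ n
instance (n : Int) : Decidable (Pre_auto_interval_labels n) := by unfold Pre_auto_interval_labels; infer_instance
def pvWitness_auto_interval_labels : Int := 7

def Spec_auto_interval_labels (n : Int) (out : List String) : Prop := out = auto_interval_labels_alt n
instance (n : Int) (out : List String) : Decidable (Spec_auto_interval_labels n out) := by unfold Spec_auto_interval_labels; infer_instance

-- ===== CLAIM (what is proved, stated in full; the proofs are below) =====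
def Claim_equal_auto_interval_labels : Prop := ∀ (n : Int), Dom_auto_interval_labels n → Pre_auto_interval_labels n → Spec_auto_interval_labels n (auto_interval_labels n)

-- ===== LEMMAS AND PROOFS =====

lemma pvSetMid {α : Type} (P T : List α) (x v : α) :
    (P ++ x :: T).set P.length v = P ++ v :: T := by
  induction P with
  | nil => rfl
  | cons a P ih => simpa using ih

lemma pvInitLabels (N : Nat) (h : 2 ≤ N) :
    PySem.List.pySetD (PySem.List.pySetD (List.replicate N ("" : String)) 0 "low") (-1) "high"
      = "low" :: List.replicate (N - 2) "" ++ ["high"] := by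
  obtain ⟨M, rfl⟩ : ∃ M, N = M + 2 := ⟨N - 2, by omega⟩
  have hrep : List.replicate (M + 2) ("" : String) = "" :: List.replicate (M + 1) "" := rfl
  have h0 : PySem.List.pySetD (List.replicate (M + 2) ("" : String)) 0 "low"
      = "low" :: List.replicate (M + 1) "" := by
    rw [hrep, PySem.List.pySetD_of_nonneg _ _ (by norm_num)]
    rfl
  rw [h0]
  have hlen : ("low" :: List.replicate (M + 1) ("" : String)).length = M + 2 := by simp
  simp only [PySem.List.pySetD, PySem.List.pySet?, PySem.List.pyIdx?, hlen]
  have hc1 : ¬ ((0 : Int) ≤ -1) := by norm_num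
  have hc2 : (-(↑(M + 2) : Int)) ≤ -1 := by push_cast; omega
  rw [if_neg hc1, if_pos hc2]
  have hidx : M + 2 - ((-(-1 : Int)).toNat) = M + 1 := by norm_num
  rw [hidx]
  simp only [Option.map_some, Option.getD_some]
  have hrep2 : List.replicate (M + 1) ("" : String) = List.replicate M "" ++ [""] := by
    exact List.replicate_succ'
  rw [hrep2]
  have : ("low" :: (List.replicate M ("" : String) ++ [""])) = ("low" :: List.replicate M "") ++ "" :: [] := by simp
  rw [this]
  have hl2 : ("low" :: List.replicate M ("" : String)).length = M + 1 := by simp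
  rw [← hl2, pvSetMid]
  simp

lemma pvFillHigh_block (k : Nat) : ∀ (P S : List String) (r : Int),
    pvFillHigh (P ++ List.replicate k "" ++ S)
        (PySem.List.pyRange (P.length : Int) ((P.length : Int) + (k : Int))) r
      = P ++ (List.range k).map (fun (j : Nat) => "mid_high" ++ PySem.Int.toStr (r + (j : Int))) ++ S := by
  induction k with
  | zero =>
      intro P S r
      rw [PySem.List.pyRange_one_eq_nil (by simp)]
      simp [pvFillHigh]
  | succ k ih =>
      intro P S r
      rw [PySem.List.pyRange_one_cons (by push_cast; omega)]
      simp only [pvFillHigh]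
      set v := "mid_high" ++ PySem.Int.toStr r with hv
      have hset : PySem.List.pySetD (P ++ List.replicate (k + 1) "" ++ S) (P.length : Int) v
          = (P ++ [v]) ++ List.replicate k "" ++ S := by
        rw [PySem.List.pySetD_natCast]
        rw [List.replicate_succ]
        have : P ++ ("" :: List.replicate k "") ++ S = P ++ "" :: (List.replicate k "" ++ S) := by simp
        rw [this, pvSetMid]
        simp
      rw [hset]
      have hrng : PySem.List.pyRange ((P.length : Int) + 1) ((P.length : Int) + ((k : Nat) + 1 : Nat))
          = PySem.List.pyRange (((P ++ [v]).length : Int)) (((P ++ [v]).length : Int) + (k : Int)) := by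
        congr 1 <;> · simp only [List.length_append, List.length_cons, List.length_nil]; push_cast; omega
      rw [hrng, ih]
      rw [List.range_succ_eq_map]
      simp only [List.map_cons, List.map_map]
      have hmap : (List.range k).map ((fun (j : Nat) => "mid_high" ++ PySem.Int.toStr (r + (j : Int))) ∘ Nat.succ)
          = (List.range k).map (fun (j : Nat) => "mid_high" ++ PySem.Int.toStr (r + 1 + (j : Int))) := by
        apply List.map_congr_left
        intro j _
        simp only [Function.comp]
        congr 1
        push_cast
        ring
      rw [hmap]
      simp [hv]

lemma pvFillLow_block (k : Nat) : ∀ (S P : List String) (r : Int),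
    pvFillLow (P ++ List.replicate k "" ++ S)
        (PySem.List.pyRange (P.length : Int) ((P.length : Int) + (k : Int))).reverse r
      = P ++ (List.range k).map (fun (j : Nat) => "mid_low" ++ PySem.Int.toStr (r + (k : Int) - 1 - (j : Int))) ++ S := by
  induction k with
  | zero =>
      intro S P r
      rw [PySem.List.pyRange_one_eq_nil (by simp)]
      simp [pvFillLow]
  | succ k ih =>
      intro S P r
      have hsplit : ((P.length : Int) + ((k : Nat) + 1 : Nat)) = ((P.length : Int) + (k : Int)) + 1 := by
        push_cast; omega
      rw [hsplit, PySem.List.pyRange_one_succ_right (by push_cast; omega), List.reverse_append]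
      simp only [List.reverse_cons, List.reverse_nil, List.nil_append, List.singleton_append, pvFillLow]
      set v := "mid_low" ++ PySem.Int.toStr r with hv
      have hset : PySem.List.pySetD (P ++ List.replicate (k + 1) "" ++ S) ((P.length : Int) + (k : Int)) v
          = P ++ List.replicate k "" ++ (v :: S) := by
        have hcast : ((P.length : Int) + (k : Int)) = (((P.length + k : Nat) : Nat) : Int) := by push_cast; omega
        rw [hcast, PySem.List.pySetD_natCast]
        rw [List.replicate_succ']
        have : P ++ (List.replicate k "" ++ [""]) ++ S = (P ++ List.replicate k "") ++ "" :: S := by simp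
        rw [this]
        have hlen : P.length + k = (P ++ List.replicate k ("" : String)).length := by simp
        rw [hlen, pvSetMid]
      rw [hset, ih]
      rw [List.range_succ]
      simp only [List.map_append, List.map_cons, List.map_nil]
      have hmap : (List.range k).map (fun (j : Nat) => "mid_low" ++ PySem.Int.toStr (r + 1 + (k : Int) - 1 - (j : Int)))
          = (List.range k).map (fun (j : Nat) => "mid_low" ++ PySem.Int.toStr (r + ((k : Nat) + 1 : Nat) - 1 - (j : Int))) := by
        apply List.map_congr_left
        intro j _
        congr 1
        push_cast
        ring
      rw [hmap]
      have hlast : "mid_low" ++ PySem.Int.toStr (r + ((k : Nat) + 1 : Nat) - 1 - (k : Int)) = v := by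
        rw [hv]
        congr 1
        push_cast
        ring
      rw [hlast]
      simp


-- A-side evaluation, odd middle count
lemma pvAOdd (N c : Nat) (hN : 4 ≤ N) (hc : 2 * c + 1 = N - 2) :
    auto_interval_labels (N : Int)
      = ["low"] ++ (List.range c).map (fun (j : Nat) => "mid_low" ++ PySem.Int.toStr (1 + (c : Int) - 1 - (j : Int)))
          ++ ["mid"] ++ (List.range (N - 3 - c)).map (fun (j : Nat) => "mid_high" ++ PySem.Int.toStr (1 + (j : Int)))
          ++ ["high"] := by
  have hm2 : ((N : Int) - 2) = ((N - 2 : Nat) : Int) := by omega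
  have hmod : PySem.Int.mod ((N - 2 : Nat) : Int) 2 = (((N - 2) % 2 : Nat) : Int) := by
    exact_mod_cast PySem.Int.mod_natCast (N - 2) 2
  have hdiv : PySem.Int.floordiv ((N - 2 : Nat) : Int) 2 = (((N - 2) / 2 : Nat) : Int) := by
    exact_mod_cast PySem.Int.floordiv_natCast (N - 2) 2
  have hcd : (N - 2) / 2 = c := by omega
  have hcm : (N - 2) % 2 = 1 := by omega
  rw [auto_interval_labels]
  rw [if_neg (by omega : ¬ ((N : Int) = 1)), if_neg (by omega : ¬ ((N : Int) = 2)),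
      if_neg (by omega : ¬ ((N : Int) = 3))]
  simp only [hm2, hmod, hdiv, hcd, hcm, Int.toNat_natCast, Nat.cast_one]
  simp only [if_true]
  rw [pvInitLabels N (by omega)]
  -- place "mid" at index 1 + c
  have hrepsplit : List.replicate (N - 2) ("" : String)
      = List.replicate c "" ++ "" :: List.replicate (N - 3 - c) "" := by
    rw [show N - 2 = c + (1 + (N - 3 - c)) by omega, List.replicate_add, List.replicate_add]
    simp [List.replicate_succ]
  have hmid : PySem.List.pySetD ("low" :: List.replicate (N - 2) ("" : String) ++ ["high"]) (1 + (c : Int)) "mid"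
      = ["low"] ++ List.replicate c "" ++ ("mid" :: (List.replicate (N - 3 - c) "" ++ ["high"])) := by
    rw [show ((1 : Int) + (c : Int)) = ((1 + c : Nat) : Int) by push_cast; ring, PySem.List.pySetD_natCast]
    rw [hrepsplit]
    have hshape : ("low" :: (List.replicate c ("" : String) ++ "" :: List.replicate (N - 3 - c) "") ++ ["high"])
        = ("low" :: List.replicate c "") ++ "" :: (List.replicate (N - 3 - c) "" ++ ["high"]) := by simp
    rw [hshape]
    rw [show 1 + c = ("low" :: List.replicate c ("" : String)).length by simp; omega, pvSetMid]
    simp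
  rw [hmid]
  -- low fill
  have hr1 : PySem.List.pyRange 1 (1 + (c : Int))
      = PySem.List.pyRange ((["low"] : List String).length : Int)
          (((["low"] : List String).length : Int) + (c : Int)) := by
    norm_num
  rw [hr1, pvFillLow_block]
  -- high fill
  set lowmap := (List.range c).map (fun (j : Nat) => "mid_low" ++ PySem.Int.toStr (1 + (c : Int) - 1 - (j : Int))) with hlm
  have hshape2 : ["low"] ++ lowmap ++ ("mid" :: (List.replicate (N - 3 - c) "" ++ ["high"]))
      = (["low"] ++ lowmap ++ ["mid"]) ++ List.replicate (N - 3 - c) "" ++ ["high"] := by simp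
  rw [hshape2]
  have hlen2 : (((["low"] ++ lowmap ++ ["mid"]) : List String).length : Int) = 2 + (c : Int) := by
    simp [hlm]; push_cast; ring
  have hr2 : PySem.List.pyRange (2 + (c : Int)) ((N : Int) - 1)
      = PySem.List.pyRange ((((["low"] ++ lowmap ++ ["mid"]) : List String).length : Int))
          (((((["low"] ++ lowmap ++ ["mid"]) : List String).length : Int)) + ((N - 3 - c : Nat) : Int)) := by
    rw [hlen2]
    congr 1
    push_cast
    omega
  rw [hr2, pvFillHigh_block]


-- A-side evaluation, even middle count
lemma pvAEven (N c : Nat) (hN : 4 ≤ N) (hc : 2 * c = N - 2) :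
    auto_interval_labels (N : Int)
      = ["low"] ++ (List.range c).map (fun (j : Nat) => "mid_low" ++ PySem.Int.toStr (1 + (c : Int) - 1 - (j : Int)))
          ++ (List.range (N - 2 - c)).map (fun (j : Nat) => "mid_high" ++ PySem.Int.toStr (1 + (j : Int)))
          ++ ["high"] := by
  have hm2 : ((N : Int) - 2) = ((N - 2 : Nat) : Int) := by omega
  have hmod : PySem.Int.mod ((N - 2 : Nat) : Int) 2 = (((N - 2) % 2 : Nat) : Int) := by
    exact_mod_cast PySem.Int.mod_natCast (N - 2) 2
  have hdiv : PySem.Int.floordiv ((N - 2 : Nat) : Int) 2 = (((N - 2) / 2 : Nat) : Int) := by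
    exact_mod_cast PySem.Int.floordiv_natCast (N - 2) 2
  have hcd : (N - 2) / 2 = c := by omega
  have hcm : (N - 2) % 2 = 0 := by omega
  rw [auto_interval_labels]
  rw [if_neg (by omega : ¬ ((N : Int) = 1)), if_neg (by omega : ¬ ((N : Int) = 2)),
      if_neg (by omega : ¬ ((N : Int) = 3))]
  simp only [hm2, hmod, hdiv, hcd, hcm, Int.toNat_natCast, Nat.cast_zero]
  rw [if_neg (by norm_num)]
  rw [pvInitLabels N (by omega)]
  have hrepsplit : List.replicate (N - 2) ("" : String)
      = List.replicate c "" ++ List.replicate (N - 2 - c) "" := by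
    rw [← List.replicate_add]
    congr 1
    omega
  have hshape : ("low" :: List.replicate (N - 2) ("" : String) ++ ["high"])
      = ["low"] ++ List.replicate c "" ++ (List.replicate (N - 2 - c) "" ++ ["high"]) := by
    rw [hrepsplit]; simp only [List.cons_append, List.nil_append, List.append_assoc, List.singleton_append]
  rw [hshape]
  have hr1 : PySem.List.pyRange 1 (1 + (c : Int))
      = PySem.List.pyRange ((["low"] : List String).length : Int)
          (((["low"] : List String).length : Int) + (c : Int)) := by
    norm_num
  rw [hr1, pvFillLow_block]
  set lowmap := (List.range c).map (fun (j : Nat) => "mid_low" ++ PySem.Int.toStr (1 + (c : Int) - 1 - (j : Int))) with hlm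
  have hshape2 : ["low"] ++ lowmap ++ (List.replicate (N - 2 - c) "" ++ ["high"])
      = (["low"] ++ lowmap) ++ List.replicate (N - 2 - c) "" ++ ["high"] := by simp
  rw [hshape2]
  have hlen2 : (((["low"] ++ lowmap) : List String).length : Int) = 1 + (c : Int) := by
    simp [hlm]; omega
  have hr2 : PySem.List.pyRange (1 + (c : Int)) ((N : Int) - 1)
      = PySem.List.pyRange ((((["low"] ++ lowmap) : List String).length : Int))
          (((((["low"] ++ lowmap) : List String).length : Int)) + ((N - 2 - c : Nat) : Int)) := by
    rw [hlen2]
    congr 1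
    omega
  rw [hr2, pvFillHigh_block]


-- B-side evaluation, odd middle count
lemma pvAltOdd (N c : Nat) (hN : 4 ≤ N) (hc : 2 * c + 1 = N - 2) :
    auto_interval_labels_alt (N : Int)
      = ["low"] ++ (List.range c).map (fun (j : Nat) => "mid_low" ++ PySem.Int.toStr (1 + (c : Int) - 1 - (j : Int)))
          ++ ["mid"] ++ (List.range (N - 3 - c)).map (fun (j : Nat) => "mid_high" ++ PySem.Int.toStr (1 + (j : Int)))
          ++ ["high"] := by
  have hm2 : ((N : Int) - 2) = ((N - 2 : Nat) : Int) := by omega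
  have hmod : PySem.Int.mod ((N - 2 : Nat) : Int) 2 = (((N - 2) % 2 : Nat) : Int) := by
    exact_mod_cast PySem.Int.mod_natCast (N - 2) 2
  have hdiv : PySem.Int.floordiv ((N - 2 : Nat) : Int) 2 = (((N - 2) / 2 : Nat) : Int) := by
    exact_mod_cast PySem.Int.floordiv_natCast (N - 2) 2
  have hcd : (N - 2) / 2 = c := by omega
  have hcm : (N - 2) % 2 = 1 := by omega
  simp only [auto_interval_labels_alt, hm2, hdiv, hcd]
  have e0 : PySem.List.pyRange (0 : Int) (N : Int)
      = PySem.List.pyRange 0 1 ++ PySem.List.pyRange 1 (N : Int) :=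
    PySem.List.pyRange_one_append 0 1 (N : Int) (by norm_num) (by omega)
  have e1 : PySem.List.pyRange (1 : Int) (N : Int)
      = PySem.List.pyRange 1 (1 + (c : Int)) ++ PySem.List.pyRange (1 + (c : Int)) (N : Int) :=
    PySem.List.pyRange_one_append 1 (1 + (c : Int)) (N : Int) (by omega) (by omega)
  have e2 : PySem.List.pyRange (1 + (c : Int)) (N : Int)
      = PySem.List.pyRange (1 + (c : Int)) (2 + (c : Int)) ++ PySem.List.pyRange (2 + (c : Int)) (N : Int) :=
    PySem.List.pyRange_one_append (1 + (c : Int)) (2 + (c : Int)) (N : Int) (by omega) (by omega)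
  have e3 : PySem.List.pyRange (2 + (c : Int)) (N : Int)
      = PySem.List.pyRange (2 + (c : Int)) ((N : Int) - 1) ++ PySem.List.pyRange ((N : Int) - 1) (N : Int) :=
    PySem.List.pyRange_one_append (2 + (c : Int)) ((N : Int) - 1) (N : Int) (by omega) (by omega)
  have s0 : PySem.List.pyRange (0 : Int) 1 = [0] := by decide
  have s1 : PySem.List.pyRange (1 + (c : Int)) (2 + (c : Int)) = [1 + (c : Int)] := by
    have h := PySem.List.pyRange_one_singleton (1 + (c : Int))
    rw [show (1 + (c : Int)) + 1 = 2 + (c : Int) by ring] at h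
    exact h
  have s2 : PySem.List.pyRange ((N : Int) - 1) (N : Int) = [(N : Int) - 1] := by
    have h := PySem.List.pyRange_one_singleton ((N : Int) - 1)
    rw [show ((N : Int) - 1) + 1 = (N : Int) by ring] at h
    exact h
  rw [e0, e1, e2, e3, s0, s1, s2]
  simp only [List.map_append, List.map_cons, List.map_nil]
  have l0 : pvLabel (N : Int) ((N - 2 : Nat) : Int) (c : Int) 0 = "low" := by
    unfold pvLabel
    rw [hmod, hcm, if_neg (by rintro ⟨-, h⟩; omega), if_pos rfl]
  have lmid : pvLabel (N : Int) ((N - 2 : Nat) : Int) (c : Int) (1 + (c : Int)) = "mid" := by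
    unfold pvLabel
    rw [hmod, hcm, if_pos ⟨by norm_num, rfl⟩]
  have lhigh : pvLabel (N : Int) ((N - 2 : Nat) : Int) (c : Int) ((N : Int) - 1) = "high" := by
    unfold pvLabel
    rw [hmod, hcm, if_neg (by rintro ⟨-, h⟩; omega), if_neg (by omega), if_pos rfl]
  have seglow : (PySem.List.pyRange 1 (1 + (c : Int))).map (pvLabel (N : Int) ((N - 2 : Nat) : Int) (c : Int))
      = (List.range c).map (fun (j : Nat) => "mid_low" ++ PySem.Int.toStr (1 + (c : Int) - 1 - (j : Int))) := by
    rw [List.map_congr_left (g := fun i => "mid_low" ++ PySem.Int.toStr ((c : Int) + 1 - i)) ?_]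
    · rw [PySem.List.pyRange_one 1 (1 + (c : Int)), List.map_map,
        show ((1 + (c : Int)) - 1).toNat = c by omega]
      apply List.map_congr_left
      intro j _
      simp only [Function.comp]
      congr 1
      push_cast
      ring
    · intro i hi
      rw [PySem.List.mem_pyRange_one] at hi
      unfold pvLabel
      rw [hmod, hcm, if_neg (by rintro ⟨-, h⟩; omega), if_neg (by omega), if_neg (by omega),
        if_pos (by omega)]
  have seghigh : (PySem.List.pyRange (2 + (c : Int)) ((N : Int) - 1)).map (pvLabel (N : Int) ((N - 2 : Nat) : Int) (c : Int))
      = (List.range (N - 3 - c)).map (fun (j : Nat) => "mid_high" ++ PySem.Int.toStr (1 + (j : Int))) := by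
    rw [List.map_congr_left (g := fun i => "mid_high" ++ PySem.Int.toStr (i - (c : Int) - 1)) ?_]
    · rw [PySem.List.pyRange_one (2 + (c : Int)) ((N : Int) - 1), List.map_map,
        show (((N : Int) - 1) - (2 + (c : Int))).toNat = N - 3 - c by omega]
      apply List.map_congr_left
      intro j _
      simp only [Function.comp]
      congr 1
      push_cast
      ring
    · intro i hi
      rw [PySem.List.mem_pyRange_one] at hi
      unfold pvLabel
      rw [hmod, hcm, if_neg (by rintro ⟨-, h⟩; omega), if_neg (by omega), if_neg (by omega),
        if_neg (by omega), if_pos (by norm_num)]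
  rw [l0, lmid, lhigh, seglow, seghigh]
  simp [List.append_assoc]

-- B-side evaluation, even middle count
lemma pvAltEven (N c : Nat) (hN : 4 ≤ N) (hc : 2 * c = N - 2) :
    auto_interval_labels_alt (N : Int)
      = ["low"] ++ (List.range c).map (fun (j : Nat) => "mid_low" ++ PySem.Int.toStr (1 + (c : Int) - 1 - (j : Int)))
          ++ (List.range (N - 2 - c)).map (fun (j : Nat) => "mid_high" ++ PySem.Int.toStr (1 + (j : Int)))
          ++ ["high"] := by
  have hm2 : ((N : Int) - 2) = ((N - 2 : Nat) : Int) := by omega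
  have hmod : PySem.Int.mod ((N - 2 : Nat) : Int) 2 = (((N - 2) % 2 : Nat) : Int) := by
    exact_mod_cast PySem.Int.mod_natCast (N - 2) 2
  have hdiv : PySem.Int.floordiv ((N - 2 : Nat) : Int) 2 = (((N - 2) / 2 : Nat) : Int) := by
    exact_mod_cast PySem.Int.floordiv_natCast (N - 2) 2
  have hcd : (N - 2) / 2 = c := by omega
  have hcm : (N - 2) % 2 = 0 := by omega
  simp only [auto_interval_labels_alt, hm2, hdiv, hcd]
  have e0 : PySem.List.pyRange (0 : Int) (N : Int)
      = PySem.List.pyRange 0 1 ++ PySem.List.pyRange 1 (N : Int) :=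
    PySem.List.pyRange_one_append 0 1 (N : Int) (by norm_num) (by omega)
  have e1 : PySem.List.pyRange (1 : Int) (N : Int)
      = PySem.List.pyRange 1 (1 + (c : Int)) ++ PySem.List.pyRange (1 + (c : Int)) (N : Int) :=
    PySem.List.pyRange_one_append 1 (1 + (c : Int)) (N : Int) (by omega) (by omega)
  have e3 : PySem.List.pyRange (1 + (c : Int)) (N : Int)
      = PySem.List.pyRange (1 + (c : Int)) ((N : Int) - 1) ++ PySem.List.pyRange ((N : Int) - 1) (N : Int) :=
    PySem.List.pyRange_one_append (1 + (c : Int)) ((N : Int) - 1) (N : Int) (by omega) (by omega)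
  have s0 : PySem.List.pyRange (0 : Int) 1 = [0] := by decide
  have s2 : PySem.List.pyRange ((N : Int) - 1) (N : Int) = [(N : Int) - 1] := by
    have h := PySem.List.pyRange_one_singleton ((N : Int) - 1)
    rw [show ((N : Int) - 1) + 1 = (N : Int) by ring] at h
    exact h
  rw [e0, e1, e3, s0, s2]
  simp only [List.map_append, List.map_cons, List.map_nil]
  have l0 : pvLabel (N : Int) ((N - 2 : Nat) : Int) (c : Int) 0 = "low" := by
    unfold pvLabel
    rw [hmod, hcm, if_neg (by rintro ⟨-, h⟩; omega), if_pos rfl]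
  have lhigh : pvLabel (N : Int) ((N - 2 : Nat) : Int) (c : Int) ((N : Int) - 1) = "high" := by
    unfold pvLabel
    rw [hmod, hcm, if_neg (by rintro ⟨-, h⟩; omega), if_neg (by omega), if_pos rfl]
  have seglow : (PySem.List.pyRange 1 (1 + (c : Int))).map (pvLabel (N : Int) ((N - 2 : Nat) : Int) (c : Int))
      = (List.range c).map (fun (j : Nat) => "mid_low" ++ PySem.Int.toStr (1 + (c : Int) - 1 - (j : Int))) := by
    rw [List.map_congr_left (g := fun i => "mid_low" ++ PySem.Int.toStr ((c : Int) + 1 - i)) ?_]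
    · rw [PySem.List.pyRange_one 1 (1 + (c : Int)), List.map_map,
        show ((1 + (c : Int)) - 1).toNat = c by omega]
      apply List.map_congr_left
      intro j _
      simp only [Function.comp]
      congr 1
      push_cast
      ring
    · intro i hi
      rw [PySem.List.mem_pyRange_one] at hi
      unfold pvLabel
      rw [hmod, hcm, if_neg (by rintro ⟨h, -⟩; omega), if_neg (by omega), if_neg (by omega),
        if_pos (by omega)]
  have seghigh : (PySem.List.pyRange (1 + (c : Int)) ((N : Int) - 1)).map (pvLabel (N : Int) ((N - 2 : Nat) : Int) (c : Int))
      = (List.range (N - 2 - c)).map (fun (j : Nat) => "mid_high" ++ PySem.Int.toStr (1 + (j : Int))) := by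
    rw [List.map_congr_left (g := fun i => "mid_high" ++ PySem.Int.toStr (i - (c : Int))) ?_]
    · rw [PySem.List.pyRange_one (1 + (c : Int)) ((N : Int) - 1), List.map_map,
        show (((N : Int) - 1) - (1 + (c : Int))).toNat = N - 2 - c by omega]
      apply List.map_congr_left
      intro j _
      simp only [Function.comp]
      congr 1
      push_cast
      ring
    · intro i hi
      rw [PySem.List.mem_pyRange_one] at hi
      unfold pvLabel
      rw [hmod, hcm, if_neg (by rintro ⟨h, -⟩; omega), if_neg (by omega), if_neg (by omega),
        if_neg (by omega), if_neg (by omega)]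
  rw [l0, lhigh, seglow, seghigh]
  simp [List.append_assoc]

-- ===== VERDICT (by name: the statement is the Claim_ definition above) =====
theorem auto_interval_labels_spec : Claim_equal_auto_interval_labels := by
  intro n hdom hpre
  unfold Pre_auto_interval_labels at hpre
  unfold Spec_auto_interval_labels
  by_cases h1 : n = 1
  · subst h1; decide
  by_cases h2 : n = 2
  · subst h2; decide
  by_cases h3 : n = 3
  · subst h3; decide
  have h4 : 4 ≤ n := by omega
  obtain ⟨N, rfl⟩ : ∃ N : Nat, n = (N : Int) := ⟨n.toNat, by omega⟩
  have hN : 4 ≤ N := by exact_mod_cast h4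
  rcases Nat.even_or_odd (N - 2) with he | ho
  · obtain ⟨c, hc⟩ := he
    rw [pvAEven N c hN (by omega), pvAltEven N c hN (by omega)]
  · obtain ⟨c, hc⟩ := ho
    rw [pvAOdd N c hN (by omega), pvAltOdd N c hN (by omega)]
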